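-- pv_equiv track=rewrite | github.com/zxiao013/RummyGame | RummyGame.py | is_discardable_kind
-- ===== SOURCE A (Python) =====
-- def is_discardable_kind(cards):
--     '''(list of int)->True
--     Function returns True if cards form 2-, 3- or 4- of a kind of the strange deck.
--     Otherwise it returns False. If there  is not enough cards for a meld it also prints  a message about it,
--     as illustrated in the followinng example runs.
--
--     Precondition: cards is a subset of the strange deck.
--
--     In this function you CANNOT use strings except in calls to print function.
--     In particular, you cannot conver elements of cards to strings.
--
--     >>> is_discardable_kind([207, 107, 407])
--     True
--     >>> is_discardable_kind([207, 107, 405, 305])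
--     False
--     >>> is_discardable_kind([207])
--     Invalid input. Discardable set needs to have at least 2 cards.
--     False
--     '''
--     l=[]
--     if len(cards)<=1:
--         return False
--     for i in cards:
--         a=i%100
--         l+=[a]
--     for j in range(0,len(l)-1):
--         if l[j]!=l[j+1]:
--             return False
--     return True
-- ===== SOURCE B (Python) =====
-- def is_discardable_kind(cards):
--     return len(cards) > 1 and len({c % 100 for c in cards}) == 1
-- ===== Notes on version B (the rewrite author's own statement) =====
-- stated objective: idiomatic
-- what changed: Replaces the explicit rank-list construction and adjacent-pair index loop with a single set comprehension of ranks and a uniqueness (len==1) check.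
import Mathlib
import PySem

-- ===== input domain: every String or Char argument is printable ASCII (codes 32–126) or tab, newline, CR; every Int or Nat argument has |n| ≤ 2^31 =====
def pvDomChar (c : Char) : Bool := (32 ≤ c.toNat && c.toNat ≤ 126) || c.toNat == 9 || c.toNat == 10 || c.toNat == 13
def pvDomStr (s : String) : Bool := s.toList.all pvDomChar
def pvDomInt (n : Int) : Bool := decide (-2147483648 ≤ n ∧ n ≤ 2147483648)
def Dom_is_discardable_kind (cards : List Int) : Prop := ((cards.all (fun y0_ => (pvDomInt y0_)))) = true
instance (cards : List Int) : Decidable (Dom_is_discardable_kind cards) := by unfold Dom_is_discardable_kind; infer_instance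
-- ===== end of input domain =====

-- B replaces A's rank-list build plus adjacent-pair index loop by a set of ranks and a len==1 check (idiomatic).

-- ===== PORT A =====
-- the second for-loop of A, with its early 'return False'
def kindLoop (l : List Int) : List Int → Bool
  | [] => true
  | j :: js =>
    if PySem.List.pyGetD l j 0 ≠ PySem.List.pyGetD l (j + 1) 0 then false
    else kindLoop l js

def is_discardable_kind (cards : List Int) : Bool :=
  let l : List Int := []
  if cards.length ≤ 1 then false
  else
    let l := cards.foldl (fun acc i => let a := PySem.Int.mod i 100; acc ++ [a]) l
    kindLoop l (PySem.List.pyRange 0 ((l.length : Int) - 1) 1)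

-- ===== PORT B =====
def is_discardable_kind_alt (cards : List Int) : Bool :=
  let s : PySem.Set Int := PySem.Set.ofList (cards.map (fun c => PySem.Int.mod c 100))
  decide (1 < cards.length) && decide (PySem.Set.len s = 1)

-- ===== PRECONDITION & SPEC =====
def Spec_is_discardable_kind (cards : List Int) (out : Bool) : Prop := out = is_discardable_kind_alt cards
instance (cards : List Int) (out : Bool) : Decidable (Spec_is_discardable_kind cards out) := by unfold Spec_is_discardable_kind; infer_instance

-- ===== CLAIM (what is proved, stated in full; the proofs are below) =====
def Claim_equal_is_discardable_kind : Prop := ∀ (cards : List Int), Dom_is_discardable_kind cards → Spec_is_discardable_kind cards (is_discardable_kind cards)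

-- ===== LEMMAS AND PROOFS =====

theorem foldl_app_map (f : Int → Int) : ∀ (t acc : List Int),
    t.foldl (fun acc i => acc ++ [f i]) acc = acc ++ t.map f := by
  intro t
  induction t with
  | nil => simp
  | cons b t ih => intro acc; simp [List.foldl, ih]

theorem pyRange_shift (m : Int) :
    PySem.List.pyRange 1 (m + 1) 1 = (PySem.List.pyRange 0 m 1).map (fun j => j + 1) := by
  rw [PySem.List.pyRange_one, PySem.List.pyRange_one, List.map_map]
  have hm : m + 1 - 1 = m - 0 := by ring
  rw [hm]
  exact List.map_congr_left (by intro k _; simp [Function.comp]; ring)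

theorem kindLoop_shift (x : Int) (l : List Int) : ∀ js : List Int, (∀ j ∈ js, 0 ≤ j) →
    kindLoop (x :: l) (js.map (fun j => j + 1)) = kindLoop l js := by
  intro js
  induction js with
  | nil => simp [kindLoop]
  | cons j js ih =>
    intro h
    have hj : 0 ≤ j := h j (by simp)
    have e1 : PySem.List.pyGetD (x :: l) (j + 1) 0 = PySem.List.pyGetD l j 0 := by
      rw [PySem.List.pyGetD_of_nonneg _ _ (by omega), PySem.List.pyGetD_of_nonneg _ _ hj]
      have : (j + 1).toNat = j.toNat + 1 := by omega
      simp [this]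
    have e2 : PySem.List.pyGetD (x :: l) (j + 1 + 1) = PySem.List.pyGetD l (j + 1) := by
      funext d
      rw [PySem.List.pyGetD_of_nonneg _ _ (by omega), PySem.List.pyGetD_of_nonneg _ _ (by omega)]
      have : (j + 1 + 1).toNat = (j + 1).toNat + 1 := by omega
      simp [this]
    simp only [List.map, kindLoop, e1, e2]
    split
    · rfl
    · exact ih (fun j' hj' => h j' (by simp [hj']))

-- A's index loop over range(0, len(l)-1) checks that l is a constant list
theorem kindLoop_eq_all : ∀ (a : Int) (t : List Int),
    kindLoop (a :: t) (PySem.List.pyRange 0 (((a :: t).length : Int) - 1) 1)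
      = t.all (fun x => x == a) := by
  intro a t
  induction t generalizing a with
  | nil => simp [PySem.List.pyRange_one_eq_nil, kindLoop]
  | cons b t ih =>
    have hlen : (((a :: b :: t).length : Int)) - 1 = (t.length : Int) + 1 := by
      simp
    rw [hlen, PySem.List.pyRange_one_cons (by positivity)]
    have g0 : PySem.List.pyGetD (a :: b :: t) 0 0 = a := by
      rw [PySem.List.pyGetD_of_nonneg _ _ (by omega)]; rfl
    have g1 : PySem.List.pyGetD (a :: b :: t) (0 + 1) 0 = b := by
      rw [PySem.List.pyGetD_of_nonneg _ _ (by omega)]; rfl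
    by_cases hba : b = a
    · subst hba
      simp only [kindLoop, g0, g1, ne_eq, not_true_eq_false, if_false]
      rw [show (0:Int) + 1 = 1 from rfl, pyRange_shift, kindLoop_shift _ _ _
            (fun j hj => ((PySem.List.mem_pyRange_one).1 hj).1)]
      have : (t.length : Int) = ((b :: t).length : Int) - 1 := by simp
      rw [this, ih b]
      simp
    · simp only [kindLoop, g0, g1]
      rw [if_pos (by omega)]
      simp [hba]

-- length of a set-fold never drops below the accumulator's length
theorem foldl_add_len_mono : ∀ (t s : List Int), s.length ≤ (t.foldl PySem.Set.add s).length := by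
  intro t
  induction t with
  | nil => simp
  | cons b t ih =>
    intro s
    have h := ih (PySem.Set.add s b)
    have : s.length ≤ (PySem.Set.add s b).length := by
      unfold PySem.Set.add; split <;> simp
    simpa [List.foldl] using le_trans this h

theorem setlen_one : ∀ (t : List Int) (a : Int),
    ((t.foldl PySem.Set.add [a]).length = 1) ↔ (t.all (fun x => x == a) = true) := by
  intro t
  induction t with
  | nil => simp
  | cons b t ih =>
    intro a
    by_cases hb : b = a
    · subst hb
      simp [List.foldl, PySem.Set.add, PySem.Set.contains, ih]
    · have h2 : (2 : ℕ) ≤ (t.foldl PySem.Set.add [a, b]).length := foldl_add_len_mono t [a, b]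
      have hadd : PySem.Set.add [a] b = [a, b] := by
        simp [PySem.Set.add, PySem.Set.contains, hb]
      constructor
      · intro h; rw [List.foldl, hadd] at h; omega
      · intro h; simp [hb] at h

-- ===== VERDICT (by name: the statement is the Claim_ definition above) =====
theorem is_discardable_kind_spec : Claim_equal_is_discardable_kind := by
  intro cards _
  unfold Spec_is_discardable_kind is_discardable_kind is_discardable_kind_alt
  match cards with
  | [] => decide
  | [a] => simp
  | a :: b :: t =>
    simp only [List.length_cons, PySem.Set.len]
    rw [if_neg (by simp)]
    rw [foldl_app_map]
    simp only [List.nil_append]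
    rw [show (a :: b :: t).map (fun i => PySem.Int.mod i 100)
          = PySem.Int.mod a 100 :: (b :: t).map (fun i => PySem.Int.mod i 100) from rfl]
    rw [kindLoop_eq_all]
    have hof : PySem.Set.ofList
        (PySem.Int.mod a 100 :: (b :: t).map (fun i => PySem.Int.mod i 100))
        = ((b :: t).map (fun i => PySem.Int.mod i 100)).foldl PySem.Set.add
            [PySem.Int.mod a 100] := rfl
    rw [hof]
    have key := setlen_one ((b :: t).map (fun i => PySem.Int.mod i 100)) (PySem.Int.mod a 100)
    rw [Bool.eq_iff_iff]
    simp only [Bool.and_eq_true, decide_eq_true_eq, List.all_eq_true]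
    constructor
    · intro h
      exact ⟨by omega, by exact_mod_cast key.2 (List.all_eq_true.2 h)⟩
    · rintro ⟨-, h⟩
      exact List.all_eq_true.1 (key.1 (by exact_mod_cast h))
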